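-- pv_equiv track=rewrite | github.com/macsko/concurrency-theory | lab05/main.py | add_actions_to_fnf
-- ===== SOURCE A (Python) =====
-- def is_dependent_on_list(D, a, l, i):
--     if i >= len(l):
--         return False
--     else:
--         if (l[i], a) in D:
--             return True
--         else:
--             return is_dependent_on_list(D, a, l, i + 1)
--
-- def append(l, v):
--     return l + [v]
--
-- def insert(l, i, v):
--     return l[:i] + [v] + l[i + 1:]
--
-- def fnf_action_index(D, a, result, i):
--     # Jeżeli nie była zależna z żadną wcześniejszą akcją to wstawić na indeks 0
--     if i == -1:
--         return 0
--     else: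
--         # Jeżeli była zależna od i-tej listy w FNF to wstawić na indeks i + 1
--         if is_dependent_on_list(D, a, result[i], 0):
--             return i + 1
--         else:
--             return fnf_action_index(D, a, result, i - 1)
--
-- def add_actions_to_fnf(D, w, i):
--     if i < 0:
--         return []
--     else:
--         # Najpierw wygenerowanie wyniku dla wcześniejszych akcji
--         result = add_actions_to_fnf(D, w, i - 1)
--         # Następnie znalezienie miejsca, gdzie powinno się wstawić obecną akcję,
--         # czyli przeglądanie listy FNF od końca i patrzenie na zależności
--         idx = fnf_action_index(D, w[i], result, len(result) - 1)
--         if len(result) == idx: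
--             # Dopisywanie nowej grupy z akcją w[i] na koniec FNF
--             return append(result, [w[i]])
--         else:
--             # Dopisywanie akcji w[i] na indeks idx w FNF
--             return insert(result, idx, append(result[idx], w[i]))
-- ===== SOURCE B (Python) =====
-- def add_actions_to_fnf(D, w, i):
--     # Single left-to-right pass; 'last' maps each action label to the highest
--     # FNF group index in which it occurs, so the target group of a new action
--     # is 1 + the max level of a dependent predecessor (0 if none).
--     if i < 0:
--         return []
--     groups = []
--     last = {}
--     for j in range(i + 1):
--         a = w[j]
--         idx = 0
--         for b, lvl in last.items():
--             if (b, a) in D and lvl + 1 > idx: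
--                 idx = lvl + 1
--         if idx == len(groups):
--             groups.append([a])
--         else:
--             groups[idx] = groups[idx] + [a]
--         last[a] = max(last.get(a, -1), idx)
--     return groups
-- ===== Notes on version B (the rewrite author's own statement) =====
-- stated objective: faster
-- what changed: Replaces A's recursion over prefixes with a per-action backward rescan of every FNF group (recursive helpers) by a single left-to-right pass that keeps a dict mapping each action label to its highest group index, computing each action's group as 1 + max level of a dependent predecessor.
import Mathlib
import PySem

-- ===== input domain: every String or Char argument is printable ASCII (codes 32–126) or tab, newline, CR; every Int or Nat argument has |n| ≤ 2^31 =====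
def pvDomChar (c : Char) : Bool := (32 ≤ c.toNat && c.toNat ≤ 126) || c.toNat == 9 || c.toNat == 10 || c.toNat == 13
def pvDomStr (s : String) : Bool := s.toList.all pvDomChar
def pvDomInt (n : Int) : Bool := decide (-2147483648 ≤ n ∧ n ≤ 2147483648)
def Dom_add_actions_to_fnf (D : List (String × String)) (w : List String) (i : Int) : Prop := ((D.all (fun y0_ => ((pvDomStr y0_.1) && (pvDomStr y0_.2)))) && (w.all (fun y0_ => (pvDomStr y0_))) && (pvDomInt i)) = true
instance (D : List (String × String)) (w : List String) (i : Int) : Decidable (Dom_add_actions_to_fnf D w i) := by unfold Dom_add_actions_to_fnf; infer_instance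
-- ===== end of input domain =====

-- B replaces A's recursion with a per-action backward rescan of all groups by one
-- left-to-right pass keeping a dict from each label to its highest group index
-- (asymptotically less rescanning); same return value, proved below.

-- ===== PORT A =====
-- Python's index i here is always ≥ 0 (calls start at 0 and increment), ported as Nat;
-- l[i] is in range in the branch where it is read, so getD is exact.
def is_dependent_on_list (D : List (String × String)) (a : String) (l : List String) (i : Nat) : Bool :=
  if i ≥ l.length then false
  else if (l.getD i "", a) ∈ D then true
  else is_dependent_on_list D a l (i + 1)
termination_by l.length - i

def pyAppend {α : Type} (l : List α) (v : α) : List α := l ++ [v]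

-- Python insert(l, i, v) = l[:i] + [v] + l[i+1:]; only called with 0 ≤ i < len l,
-- where the slices are exactly take/drop.
def pyInsert {α : Type} (l : List α) (i : Nat) (v : α) : List α := l.take i ++ [v] ++ l.drop (i + 1)

-- Python's Int argument i is written as j - 1 (j : Nat): 'i == -1' is j = 0, the
-- recursive call on i - 1 is j - 1, and the caller passes len(result) - 1, i.e.
-- j = len(result).  The returned int is always ≥ 0, given as Nat.
def fnf_action_index (D : List (String × String)) (a : String) (result : List (List String)) : Nat → Nat
  | 0 => 0
  | j + 1 =>
    if is_dependent_on_list D a (result.getD j []) 0 then j + 1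
    else fnf_action_index D a result j

def add_actions_to_fnf (D : List (String × String)) (w : List String) (i : Int) : List (List String) :=
  if i < 0 then []
  else
    let result := add_actions_to_fnf D w (i - 1)
    let a := (PySem.List.pyGet? w i).getD ""   -- w[i]; Pre_ gives 0 ≤ i < len w here, so pyGet? is some
    let idx := fnf_action_index D a result result.length
    if result.length = idx then pyAppend result [a]
    else pyInsert result idx (pyAppend (result.getD idx []) a)
termination_by (i + 1).toNat
decreasing_by omega

-- ===== PORT B =====
-- inner loop of Source B: idx = running max of lvl+1 over dependent dict entries, from 0
def altIdx (D : List (String × String)) (a : String) (items : List (String × Int)) : Int :=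
  items.foldl (fun idx p => if (p.1, a) ∈ D ∧ p.2 + 1 > idx then p.2 + 1 else idx) 0

-- loop body of Source B
def altStep (D : List (String × String))
    (st : List (List String) × PySem.Dict String Int) (a : String) :
    List (List String) × PySem.Dict String Int :=
  let idx := altIdx D a st.2.items
  let groups :=
    if idx = (st.1.length : Int) then st.1 ++ [[a]]
    else st.1.modify idx.toNat (· ++ [a])       -- groups[idx] = groups[idx] + [a]
  (groups, st.2.insert a (max (st.2.getD a (-1)) idx))

def add_actions_to_fnf_alt (D : List (String × String)) (w : List String) (i : Int) : List (List String) :=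
  if i < 0 then []
  else ((PySem.List.pyRange 0 (i + 1)).foldl
    (fun st j => altStep D st ((PySem.List.pyGet? w j).getD ""))   -- a = w[j]; in range under Pre_
    ([], PySem.Dict.empty)).1

-- ===== PRECONDITION & SPEC =====
-- A raises IndexError (at w[i]) exactly when i ≥ len(w); on every other input it returns.
def Pre_add_actions_to_fnf (D : List (String × String)) (w : List String) (i : Int) : Prop :=
  i < (w.length : Int)
instance (D : List (String × String)) (w : List String) (i : Int) : Decidable (Pre_add_actions_to_fnf D w i) := by unfold Pre_add_actions_to_fnf; infer_instance

def pvWitness_add_actions_to_fnf : (List (String × String)) × List String × Int :=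
  ([("a", "b")], ["a", "b", "a"], 2)

def Spec_add_actions_to_fnf (D : List (String × String)) (w : List String) (i : Int) (out : List (List String)) : Prop := out = add_actions_to_fnf_alt D w i
instance (D : List (String × String)) (w : List String) (i : Int) (out : List (List String)) : Decidable (Spec_add_actions_to_fnf D w i out) := by unfold Spec_add_actions_to_fnf; infer_instance

-- ===== CLAIM (what is proved, stated in full; the proofs are below) =====
def Claim_equal_add_actions_to_fnf : Prop := ∀ (D : List (String × String)) (w : List String) (i : Int), Dom_add_actions_to_fnf D w i → Pre_add_actions_to_fnf D w i → Spec_add_actions_to_fnf D w i (add_actions_to_fnf D w i)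

-- ===== LEMMAS AND PROOFS =====

-- group g of `groups` contains an action that a depends on
def depG (D : List (String × String)) (a : String) (groups : List (List String)) (g : Nat) : Prop :=
  ∃ b ∈ groups.getD g [], (b, a) ∈ D

-- the invariant tying B's dict to the groups built so far: each value is the
-- maximal group index of its key, and every placed action is a key
def FnfInv (groups : List (List String)) (d : PySem.Dict String Int) : Prop :=
  d.keys.Nodup ∧
  (∀ p ∈ d.items, 0 ≤ p.2 ∧ p.2 < (groups.length : Int) ∧ p.1 ∈ groups.getD p.2.toNat []) ∧
  (∀ g, g < groups.length → ∀ b ∈ groups.getD g [], ∃ v, (b, v) ∈ d.items ∧ (g : Int) ≤ v)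

-- what both index computations satisfy (and which determines the index uniquely)
def GoodIdx (D : List (String × String)) (a : String) (groups : List (List String)) (k : Int) : Prop :=
  0 ≤ k ∧
  (k = 0 ∨ ∃ g, g < groups.length ∧ k = (g : Int) + 1 ∧ depG D a groups g) ∧
  (∀ g, g < groups.length → depG D a groups g → (g : Int) < k)

-- the common one-action update of the groups, as both programs' branches compute it
def stepG (groups : List (List String)) (a : String) (k : Nat) : List (List String) :=
  if k = groups.length then groups ++ [[a]] else groups.set k (groups.getD k [] ++ [a])

lemma getD_big {α : Type} (l : List α) (j : Nat) (d : α) (h : l.length ≤ j) : l.getD j d = d := by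
  simp [List.getD_eq_getElem?_getD, List.getElem?_eq_none h]

lemma getD_set {α : Type} (l : List α) (i j : Nat) (v d : α) :
    (l.set i v).getD j d = if i = j ∧ i < l.length then v else l.getD j d := by
  simp only [List.getD_eq_getElem?_getD, List.getElem?_set]
  by_cases h1 : i = j
  · subst h1
    by_cases h2 : i < l.length
    · simp [h2]
    · simp [h2]
  · simp [h1]

lemma pyInsert_eq_set {α : Type} (l : List α) (i : Nat) (v : α) (h : i < l.length) :
    pyInsert l i v = l.set i v := by
  unfold pyInsert
  rw [List.set_eq_take_append_cons_drop, if_pos h]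
  simp

lemma len_stepG (groups : List (List String)) (a : String) (k : Nat) :
    (stepG groups a k).length = if k = groups.length then groups.length + 1 else groups.length := by
  unfold stepG; split <;> simp

lemma getD_stepG (groups : List (List String)) (a : String) (k : Nat) (hk : k ≤ groups.length) :
    ∀ g, (stepG groups a k).getD g [] =
      if g = k then groups.getD g [] ++ [a] else groups.getD g [] := by
  intro g
  unfold stepG
  by_cases hke : k = groups.length
  · rw [if_pos hke]
    by_cases hgk : g = k
    · rw [if_pos hgk]
      rw [getD_big groups g [] (by omega), hgk, hke]
      simp [List.getD_eq_getElem?_getD]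
    · rw [if_neg hgk]
      by_cases hgl : g < groups.length
      · simp [List.getD_eq_getElem?_getD, List.getElem?_append_left hgl]
      · have h1 : groups.length ≤ g := Nat.le_of_not_lt hgl
        have h2 : (groups ++ [[a]]).length ≤ g := by simp; omega
        rw [getD_big _ _ _ h2, getD_big _ _ _ h1]
  · rw [if_neg hke]
    rw [getD_set]
    have hkl : k < groups.length := by omega
    by_cases hgk : g = k
    · subst hgk; simp [hkl]
    · rw [if_neg (by tauto), if_neg hgk]

lemma mem_stepG {groups : List (List String)} {a : String} {k : Nat} (hk : k ≤ groups.length)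
    (g : Nat) (b : String) (hb : b ∈ groups.getD g []) : b ∈ (stepG groups a k).getD g [] := by
  rw [getD_stepG groups a k hk g]
  split
  · exact List.mem_append.2 (Or.inl hb)
  · exact hb

lemma isdep_iff (D : List (String × String)) (a : String) (l : List String) (i : Nat) :
    is_dependent_on_list D a l i = true ↔ ∃ b ∈ l.drop i, (b, a) ∈ D := by
  fun_induction is_dependent_on_list D a l i with
  | case1 i h =>
    simp at h
    simp [List.drop_eq_nil_of_le h]
  | case2 i h hd =>
    simp only [not_le] at h
    simp only [true_iff]
    refine ⟨l.getD i "", ?_, hd⟩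
    have hg : l.getD i "" = l[i] := by
      simp [List.getD_eq_getElem?_getD, List.getElem?_eq_getElem h]
    rw [hg, List.drop_eq_getElem_cons h]
    exact List.mem_cons_self ..
  | case3 i h hd ih =>
    simp only [not_le] at h
    rw [List.drop_eq_getElem_cons h]
    constructor
    · intro hh
      obtain ⟨b, hb, hba⟩ := ih.1 hh
      exact ⟨b, List.mem_cons_of_mem _ hb, hba⟩
    · rintro ⟨b, hb, hba⟩
      rcases List.mem_cons.1 hb with rfl | hb
      · exact absurd hba (by simpa [List.getD_eq_getElem?_getD, List.getElem?_eq_getElem h] using hd)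
      · exact ih.2 ⟨b, hb, hba⟩

lemma fnf_aux (D : List (String × String)) (a : String) (groups : List (List String)) :
    ∀ j,
      (fnf_action_index D a groups j = 0 ∨
        ∃ g, g < j ∧ fnf_action_index D a groups j = g + 1 ∧ depG D a groups g) ∧
      (∀ g, g < j → depG D a groups g → g < fnf_action_index D a groups j) := by
  intro j
  induction j with
  | zero => exact ⟨Or.inl rfl, by omega⟩
  | succ j ih =>
    by_cases h : ∃ b ∈ groups.getD j [], (b, a) ∈ D
    · have hb : is_dependent_on_list D a (groups.getD j []) 0 = true := by
        rw [isdep_iff]; simpa using h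
      rw [show fnf_action_index D a groups (j + 1) = j + 1 by
        rw [fnf_action_index]; rw [if_pos hb]]
      exact ⟨Or.inr ⟨j, by omega, rfl, h⟩, by omega⟩
    · have hb : ¬ is_dependent_on_list D a (groups.getD j []) 0 = true := by
        rw [isdep_iff]; simpa using h
      rw [show fnf_action_index D a groups (j + 1) = fnf_action_index D a groups j by
        rw [fnf_action_index]; rw [if_neg hb]]
      refine ⟨?_, ?_⟩
      · rcases ih.1 with h0 | ⟨g, hg, he, hd⟩
        · exact Or.inl h0
        · exact Or.inr ⟨g, by omega, he, hd⟩
      · intro g hg hd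
        rcases Nat.lt_succ_iff_lt_or_eq.1 hg with hg' | rfl
        · exact ih.2 g hg' hd
        · exact absurd hd h

lemma fnf_good (D : List (String × String)) (a : String) (groups : List (List String)) :
    GoodIdx D a groups (fnf_action_index D a groups groups.length : Int) := by
  obtain ⟨hc, hm⟩ := fnf_aux D a groups groups.length
  refine ⟨by positivity, ?_, ?_⟩
  · rcases hc with h0 | ⟨g, hg, he, hd⟩
    · exact Or.inl (by exact_mod_cast h0)
    · exact Or.inr ⟨g, hg, by exact_mod_cast he, hd⟩
  · intro g hg hd
    exact_mod_cast hm g hg hd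

lemma fnf_le (D : List (String × String)) (a : String) (groups : List (List String)) :
    fnf_action_index D a groups groups.length ≤ groups.length := by
  rcases (fnf_aux D a groups groups.length).1 with h0 | ⟨g, hg, he, _⟩ <;> omega

lemma good_unique {D : List (String × String)} {a : String} {groups : List (List String)}
    {k1 k2 : Int} (h1 : GoodIdx D a groups k1) (h2 : GoodIdx D a groups k2) : k1 = k2 := by
  obtain ⟨hn1, hc1, hm1⟩ := h1
  obtain ⟨hn2, hc2, hm2⟩ := h2
  rcases hc1 with rfl | ⟨g1, hg1, rfl, hd1⟩ <;> rcases hc2 with rfl | ⟨g2, hg2, rfl, hd2⟩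
  · rfl
  · exact absurd (hm1 g2 hg2 hd2) (by omega)
  · exact absurd (hm2 g1 hg1 hd1) (by omega)
  · have := hm1 g2 hg2 hd2; have := hm2 g1 hg1 hd1; omega

lemma foldl_max_spec (D : List (String × String)) (a : String) :
    ∀ (items : List (String × Int)) (init : Int),
      init ≤ items.foldl (fun idx p => if (p.1, a) ∈ D ∧ p.2 + 1 > idx then p.2 + 1 else idx) init ∧
      (items.foldl (fun idx p => if (p.1, a) ∈ D ∧ p.2 + 1 > idx then p.2 + 1 else idx) init = init ∨
        ∃ p ∈ items, (p.1, a) ∈ D ∧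
          items.foldl (fun idx p => if (p.1, a) ∈ D ∧ p.2 + 1 > idx then p.2 + 1 else idx) init = p.2 + 1) ∧
      (∀ p ∈ items, (p.1, a) ∈ D →
        p.2 + 1 ≤ items.foldl (fun idx p => if (p.1, a) ∈ D ∧ p.2 + 1 > idx then p.2 + 1 else idx) init) := by
  intro items
  induction items with
  | nil => intro init; simp
  | cons q rest ih =>
    intro init
    simp only [List.foldl_cons]
    by_cases hq : (q.1, a) ∈ D ∧ q.2 + 1 > init
    · rw [if_pos hq]
      obtain ⟨ihle, ihc, ihm⟩ := ih (q.2 + 1)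
      refine ⟨by omega, ?_, ?_⟩
      · rcases ihc with he | ⟨p, hp, hpa, he⟩
        · exact Or.inr ⟨q, List.mem_cons_self .., hq.1, he⟩
        · exact Or.inr ⟨p, List.mem_cons_of_mem _ hp, hpa, he⟩
      · intro p hp hpa
        rcases List.mem_cons.1 hp with rfl | hp'
        · omega
        · exact ihm p hp' hpa
    · rw [if_neg hq]
      obtain ⟨ihle, ihc, ihm⟩ := ih init
      refine ⟨ihle, ?_, ?_⟩
      · rcases ihc with he | ⟨p, hp, hpa, he⟩
        · exact Or.inl he
        · exact Or.inr ⟨p, List.mem_cons_of_mem _ hp, hpa, he⟩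
      · intro p hp hpa
        rcases List.mem_cons.1 hp with rfl | hp'
        · have hb : ¬(p.2 + 1 > init) := fun hb => hq ⟨hpa, hb⟩
          omega
        · exact ihm p hp' hpa

lemma altIdx_good (D : List (String × String)) (a : String) {groups : List (List String)}
    {d : PySem.Dict String Int} (hI : FnfInv groups d) :
    GoodIdx D a groups (altIdx D a d.items) := by
  obtain ⟨hle, hc, hm⟩ := foldl_max_spec D a d.items 0
  refine ⟨hle, ?_, ?_⟩
  · rcases hc with h0 | ⟨p, hp, hpa, he⟩
    · exact Or.inl h0
    · obtain ⟨o1, o2, o3⟩ := hI.2.1 p hp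
      refine Or.inr ⟨p.2.toNat, by omega, ?_, ⟨p.1, o3, hpa⟩⟩
      simp only [altIdx]
      omega
  · intro g hg hd
    obtain ⟨b, hb, hba⟩ := hd
    obtain ⟨v, hv, hgv⟩ := hI.2.2 g hg b hb
    have := hm (b, v) hv hba
    simp only [altIdx]
    omega

lemma FnfInv_step (a : String) {groups : List (List String)} {d : PySem.Dict String Int}
    (hI : FnfInv groups d) (k : Nat) (hk : k ≤ groups.length) :
    FnfInv (stepG groups a k) (d.insert a (max (d.getD a (-1)) (k : Int))) := by
  obtain ⟨hnd, h2, h3⟩ := hI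
  have hlen : groups.length ≤ (stepG groups a k).length ∧ k < (stepG groups a k).length := by
    rw [len_stepG]; split <;> omega
  have hmema : a ∈ (stepG groups a k).getD k [] := by
    rw [getD_stepG groups a k hk k]; simp
  have lift : ∀ (b : String) (v : Int) (g : Nat), (b, v) ∈ d.items → (g : Int) ≤ v →
      ∃ v', (b, v') ∈ (d.insert a (max (d.getD a (-1)) (k : Int))).items ∧ (g : Int) ≤ v' := by
    intro b v g hv hgv
    by_cases hba : b = a
    · subst hba
      have hq : d.get? b = some v := PySem.Dict.get?_of_mem_items d hv hnd
      have hgd : d.getD b (-1) = v := PySem.Dict.getD_of_get?_eq_some d (-1) hq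
      exact ⟨_, PySem.Dict.mem_items_insert_self .., by rw [hgd]; omega⟩
    · exact ⟨v, (PySem.Dict.mem_items_insert ..).2 (Or.inr ⟨hv, hba⟩), hgv⟩
  refine ⟨PySem.Dict.nodup_keys_insert d a _ hnd, ?_, ?_⟩
  · intro p hp
    rcases (PySem.Dict.mem_items_insert ..).1 hp with rfl | ⟨hp', hne⟩
    · refine ⟨by omega, ?_⟩
      cases hq : d.get? a with
      | none =>
        have hgd : d.getD a (-1) = -1 := PySem.Dict.getD_of_get?_eq_none d (-1) hq
        rw [hgd]
        have hmax : max (-1 : Int) (k : Int) = (k : Int) := by omega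
        rw [hmax]
        exact ⟨(by exact_mod_cast hlen.2 : (k : Int) < ((stepG groups a k).length : Int)), by simpa using hmema⟩
      | some v =>
        have hgd : d.getD a (-1) = v := PySem.Dict.getD_of_get?_eq_some d (-1) hq
        have hv : (a, v) ∈ d.items := PySem.Dict.mem_items_of_get?_eq_some d hq
        obtain ⟨o1, o2, o3⟩ := h2 _ hv
        rw [hgd]
        by_cases hc : (k : Int) ≤ v
        · have hmax : max v (k : Int) = v := by omega
          rw [hmax]
          exact ⟨by omega, mem_stepG hk _ _ o3⟩
        · have hmax : max v (k : Int) = (k : Int) := by omega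
          rw [hmax]
          exact ⟨(by exact_mod_cast hlen.2 : (k : Int) < ((stepG groups a k).length : Int)), by simpa using hmema⟩
    · obtain ⟨o1, o2, o3⟩ := h2 p hp'
      exact ⟨o1, by omega, mem_stepG hk _ _ o3⟩
  · intro g hg b hb
    rw [getD_stepG groups a k hk g] at hb
    by_cases hgk : g = k
    · subst hgk
      rw [if_pos rfl] at hb
      rcases List.mem_append.1 hb with hbo | hba
      · have hgl : g < groups.length := by
          by_contra hno
          rw [getD_big groups g [] (by omega)] at hbo
          simp at hbo
        obtain ⟨v, hv, hgv⟩ := h3 g hgl b hbo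
        exact lift b v g hv hgv
      · have hba' : b = a := by simpa using hba
        subst hba'
        exact ⟨_, PySem.Dict.mem_items_insert_self .., by
          have : d.getD b (-1) ⊔ (g : Int) ≥ (g : Int) := le_max_right _ _
          omega⟩
    · rw [if_neg hgk] at hb
      have hgl : g < groups.length := by
        rw [len_stepG] at hg
        by_cases hke : k = groups.length
        · rw [if_pos hke] at hg
          by_contra hno
          rw [getD_big groups g [] (by omega)] at hb
          simp at hb
        · rw [if_neg hke] at hg; omega
      obtain ⟨v, hv, hgv⟩ := h3 g hgl b hb
      exact lift b v g hv hgv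

-- one action: B's step equals A's step, and the invariant is preserved
lemma step_main (D : List (String × String)) (a : String) {groups : List (List String)}
    {d : PySem.Dict String Int} (hI : FnfInv groups d) :
    (altStep D (groups, d) a).1 =
      (if groups.length = fnf_action_index D a groups groups.length then pyAppend groups [a]
       else pyInsert groups (fnf_action_index D a groups groups.length)
         (pyAppend (groups.getD (fnf_action_index D a groups groups.length) []) a)) ∧
    FnfInv (altStep D (groups, d) a).1 (altStep D (groups, d) a).2 := by
  set k := fnf_action_index D a groups groups.length with hkdef
  have hk : k ≤ groups.length := fnf_le D a groups
  have hidx : altIdx D a d.items = (k : Int) :=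
    good_unique (altIdx_good D a hI) (fnf_good D a groups)
  have hA : (if groups.length = k then pyAppend groups [a]
      else pyInsert groups k (pyAppend (groups.getD k []) a)) = stepG groups a k := by
    unfold stepG
    by_cases hke : k = groups.length
    · rw [if_pos (hke ▸ rfl), if_pos hke]; rfl
    · rw [if_neg (fun h => hke h.symm), if_neg hke]
      rw [pyInsert_eq_set _ _ _ (by omega)]
      rfl
  have hB : (altStep D (groups, d) a).1 = stepG groups a k := by
    simp only [altStep, hidx]
    unfold stepG
    by_cases hke : k = groups.length
    · rw [if_pos (by exact_mod_cast hke), if_pos hke]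
    · rw [if_neg (by exact_mod_cast hke), if_neg hke]
      rw [Int.toNat_natCast, List.modify_eq_set_get _ (by omega)]
      congr 1
      simp [List.getD_eq_getElem?_getD, List.getElem?_eq_getElem (show k < groups.length by omega)]
  have hd' : (altStep D (groups, d) a).2 = d.insert a (max (d.getD a (-1)) (k : Int)) := by
    simp only [altStep, hidx]
  refine ⟨by rw [hB, hA], ?_⟩
  rw [hB, hd']
  exact FnfInv_step a hI k hk

lemma main_lemma (D : List (String × String)) (w : List String) :
    ∀ n, n ≤ w.length →
      ((List.range n).foldl
          (fun st k => altStep D st ((PySem.List.pyGet? w ((k : Nat) : Int)).getD ""))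
          ([], PySem.Dict.empty)).1
        = add_actions_to_fnf D w ((n : Int) - 1)
      ∧ FnfInv ((List.range n).foldl
            (fun st k => altStep D st ((PySem.List.pyGet? w ((k : Nat) : Int)).getD ""))
            ([], PySem.Dict.empty)).1
          ((List.range n).foldl
            (fun st k => altStep D st ((PySem.List.pyGet? w ((k : Nat) : Int)).getD ""))
            ([], PySem.Dict.empty)).2 := by
  intro n
  induction n with
  | zero =>
    intro _
    refine ⟨?_, ?_, ?_, ?_⟩
    · rw [add_actions_to_fnf]; simp
    · simp [PySem.Dict.empty]
    · intro p hp; simp [PySem.Dict.empty] at hp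
    · intro g hg; simp at hg
  | succ n ih =>
    intro hn
    have hn' : n < w.length := by omega
    obtain ⟨ih1, ih2⟩ := ih (by omega)
    have ha : (PySem.List.pyGet? w ((n : Nat) : Int)).getD "" = w[n] := by
      rw [PySem.List.pyGet?_natCast, List.getElem?_eq_getElem hn']
      rfl
    rw [List.range_succ, List.foldl_append]
    simp only [List.foldl_cons, List.foldl_nil]
    set st := (List.range n).foldl
      (fun st k => altStep D st ((PySem.List.pyGet? w ((k : Nat) : Int)).getD ""))
      ([], PySem.Dict.empty) with hst
    have hstp : st = (st.1, st.2) := rfl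
    rw [ha, hstp]
    obtain ⟨hs1, hs2⟩ := step_main D w[n] ih2
    refine ⟨?_, hs2⟩
    rw [hs1]
    conv_rhs => rw [add_actions_to_fnf]
    rw [if_neg (by omega : ¬ ((n + 1 : Nat) : Int) - 1 < 0)]
    have hi1 : ((n + 1 : Nat) : Int) - 1 - 1 = (n : Int) - 1 := by push_cast; ring
    have hi2 : ((n + 1 : Nat) : Int) - 1 = (n : Int) := by push_cast; ring
    simp only [hi2]
    rw [← ih1]
    rw [ha]

-- ===== VERDICT (by name: the statement is the Claim_ definition above) =====
theorem add_actions_to_fnf_spec : Claim_equal_add_actions_to_fnf := by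
  intro D w i _ hpre
  unfold Spec_add_actions_to_fnf
  unfold Pre_add_actions_to_fnf at hpre
  by_cases hi : i < 0
  · rw [add_actions_to_fnf, add_actions_to_fnf_alt, if_pos hi, if_pos hi]
  · have h0 : 0 ≤ i := by omega
    set n := (i + 1).toNat with hn
    have hin : i = (n : Int) - 1 := by omega
    have hnw : n ≤ w.length := by omega
    rw [add_actions_to_fnf_alt, if_neg hi]
    have hrange : PySem.List.pyRange 0 (i + 1) = List.map (fun k : Nat => (k : Int)) (List.range n) := by
      rw [show i + 1 = ((n : Nat) : Int) by omega]
      exact PySem.List.pyRange_zero_natCast n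
    rw [hrange, List.foldl_map, hin]
    exact ((main_lemma D w n hnw).1).symm
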